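-- pv_equiv track=rewrite | github.com/jaruizes/adventofcode2021 | day3/python/main.py | process_bits
-- ===== SOURCE A (Python) =====
-- def process_bits(report):
--     results = []
--     for bit in report[0]:
--         results.append([0, 0])
--
--     for report_line in report:
--         for i in range(0, len(report_line)):
--             bit = report_line[i]
--             if bit == '0':
--                 results[i][0] = results[i][0] + 1
--             else:
--                 results[i][1] = results[i][1] + 1
--
--     return results
-- ===== SOURCE B (Python) =====
-- def process_bits(report):
--     n = len(report[0])
--     results = []
--     for i in range(n):
--         col = [line[i] for line in report if i < len(line)]
--         count0 = col.count('0')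
--         results.append([count0, len(col) - count0])
--     return results
-- ===== Notes on version B (the rewrite author's own statement) =====
-- stated objective: idiomatic
-- what changed: Column-major pass: for each bit position build the column and count '0's with list.count, instead of row-major accumulation into a mutable table.
import Mathlib
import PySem

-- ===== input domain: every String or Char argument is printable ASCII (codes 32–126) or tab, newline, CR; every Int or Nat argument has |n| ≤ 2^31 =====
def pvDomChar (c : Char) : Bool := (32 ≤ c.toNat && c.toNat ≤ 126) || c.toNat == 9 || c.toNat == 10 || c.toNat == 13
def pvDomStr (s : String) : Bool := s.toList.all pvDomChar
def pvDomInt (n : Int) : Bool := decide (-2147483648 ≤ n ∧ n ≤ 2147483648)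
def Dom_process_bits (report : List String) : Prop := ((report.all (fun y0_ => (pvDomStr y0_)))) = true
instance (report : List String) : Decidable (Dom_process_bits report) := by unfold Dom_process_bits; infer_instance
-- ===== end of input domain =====

-- B changes the traversal to a column-major pass (count each bit column directly); same cost, more idiomatic.

-- ===== PORT A =====
-- one inner-loop step of A: results[i][0] += 1 / results[i][1] += 1 depending on the char
def stepA (line : List Char) (results : List (List Int)) (i : Nat) : List (List Int) :=
  let bit := line.getD i ' '
  if bit = '0' then
    results.set i [(results.getD i []).getD 0 0 + 1, (results.getD i []).getD 1 0]
  else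
    results.set i [(results.getD i []).getD 0 0, (results.getD i []).getD 1 0 + 1]

def process_bits (report : List String) : List (List Int) :=
  let results := ((report.headD "").toList).map (fun _ => ([0, 0] : List Int))
  report.foldl (fun res line => (List.range line.toList.length).foldl (stepA line.toList) res) results

-- ===== PORT B =====
def process_bits_alt (report : List String) : List (List Int) :=
  let n := (report.headD "").toList.length
  (List.range n).map (fun i =>
    let col := (report.filter (fun line => decide (i < line.toList.length))).map
        (fun line => line.toList.getD i ' ')
    let count0 : Int := (col.count '0' : Nat)
    [count0, (col.length : Int) - count0])

-- ===== PRECONDITION & SPEC =====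
-- Pre_ = exactly where A returns: A indexes results (of width len(report[0])) at each position of
-- each line, so it raises IndexError on an empty report and whenever some line is longer than the first.
def Pre_process_bits (report : List String) : Prop :=
  report ≠ [] ∧ ∀ s ∈ report, s.toList.length ≤ (report.headD "").toList.length
instance (report : List String) : Decidable (Pre_process_bits report) := by
  unfold Pre_process_bits; infer_instance
def pvWitness_process_bits : List String := (["0110", "1010", "0001"])

def Spec_process_bits (report : List String) (out : List (List Int)) : Prop := out = process_bits_alt report
instance (report : List String) (out : List (List Int)) : Decidable (Spec_process_bits report out) := by unfold Spec_process_bits; infer_instance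

-- ===== CLAIM (what is proved, stated in full; the proofs are below) =====
def Claim_equal_process_bits : Prop := ∀ (report : List String), Dom_process_bits report → Pre_process_bits report → Spec_process_bits report (process_bits report)

-- ===== LEMMAS AND PROOFS =====

theorem stepA_length (line : List Char) (r : List (List Int)) (i : Nat) :
    (stepA line r i).length = r.length := by
  unfold stepA; dsimp only; split <;> simp

theorem lineFold_length (line : List Char) (l : List Nat) (r : List (List Int)) :
    (l.foldl (stepA line) r).length = r.length := by
  induction l generalizing r with
  | nil => rfl
  | cons a t ih => simp [List.foldl, ih, stepA_length]

-- value of one line's inner fold at position j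
theorem lineFold_getD (line : List Char) (r : List (List Int)) :
    ∀ (k : Nat), k ≤ r.length → ∀ (j : Nat),
    ((List.range k).foldl (stepA line) r).getD j [] =
      if j < k then
        (if line.getD j ' ' = '0' then
          [(r.getD j []).getD 0 0 + 1, (r.getD j []).getD 1 0]
        else
          [(r.getD j []).getD 0 0, (r.getD j []).getD 1 0 + 1])
      else r.getD j [] := by
  intro k
  induction k with
  | zero => intro _ j; simp
  | succ m ih =>
    intro hk j
    have hm : m ≤ r.length := Nat.le_of_succ_le hk
    have hlen : ((List.range m).foldl (stepA line) r).length = r.length :=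
      lineFold_length line _ r
    rw [List.range_succ, List.foldl_append]
    simp only [List.foldl]
    set P := (List.range m).foldl (stepA line) r with hP
    have hPm : P.getD m [] = r.getD m [] := by rw [ih hm m]; simp
    have hmP : m < P.length := by omega
    unfold stepA
    dsimp only
    by_cases hj : j = m
    · subst hj
      rw [hPm]
      split <;> simp [List.getD_eq_getElem?_getD, List.getElem?_set_self hmP]
    · have hset : ∀ (v : List Int), (P.set m v).getD j [] = P.getD j [] := by
        intro v
        simp [List.getD_eq_getElem?_getD, List.getElem?_set_ne (by omega : m ≠ j)]
      split <;> rw [hset, ih hm j] <;>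
        by_cases h1 : j < m <;> simp [(by omega : j < m + 1 ↔ j < m), *]

-- counts of '0' / non-'0' chars at position j over the lines of L (positions past a line's end skipped)
def cnt0 (j : Nat) (L : List String) : Nat :=
  (L.filter (fun s => decide (j < s.toList.length) && decide (s.toList.getD j ' ' = '0'))).length
def cnt1 (j : Nat) (L : List String) : Nat :=
  (L.filter (fun s => decide (j < s.toList.length) && decide (¬ s.toList.getD j ' ' = '0'))).length

theorem outer_getD (L : List String) (r : List (List Int)) (j a b : Nat)
    (hL : ∀ s ∈ L, s.toList.length ≤ r.length)
    (hj : r.getD j [] = [(a : Int), (b : Int)]) :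
    (L.foldl (fun res line => (List.range line.toList.length).foldl (stepA line.toList) res) r).getD j []
      = [(a + cnt0 j L : Int), (b + cnt1 j L : Int)] := by
  induction L generalizing r a b with
  | nil => simpa [cnt0, cnt1, List.getD_eq_getElem?_getD] using hj
  | cons s t ih =>
    simp only [List.foldl]
    set r' := (List.range s.toList.length).foldl (stepA s.toList) r with hr'
    have hlen : r'.length = r.length := lineFold_length _ _ _
    have hs : s.toList.length ≤ r.length := hL s (by simp)
    have ht : ∀ x ∈ t, x.toList.length ≤ r'.length := by
      intro x hx; rw [hlen]; exact hL x (by simp [hx])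
    have hval := lineFold_getD s.toList r s.toList.length hs j
    have hiff : (j < s.length) ↔ (j < s.toList.length) := by simp
    have h0e : (s.toList[j]?.getD ' ' = '0') ↔ (s.toList.getD j ' ' = '0') := by
      simp [List.getD_eq_getElem?_getD]
    by_cases hjs : j < s.toList.length
    · by_cases h0 : s.toList.getD j ' ' = '0'
      · have hv : r'.getD j [] = [(a + 1 : Int), (b : Int)] := by
          rw [hr', hval, if_pos hjs, if_pos h0, hj]; simp
        rw [ih r' (a+1) b ht hv]
        have c0 : cnt0 j (s :: t) = cnt0 j t + 1 := by
          simp only [cnt0, List.filter_cons, hiff, h0e, Bool.and_eq_true, decide_eq_true_eq, List.length_cons]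
          rw [if_pos ⟨hjs, h0⟩]; simp
        have c1 : cnt1 j (s :: t) = cnt1 j t := by
          simp only [cnt1, List.filter_cons, hiff, h0e, Bool.and_eq_true, decide_eq_true_eq, List.length_cons]
          rw [if_neg (by simp_all)]
        rw [c0, c1]; push_cast; ring_nf
      · have hv : r'.getD j [] = [(a : Int), (b + 1 : Int)] := by
          rw [hr', hval, if_pos hjs, if_neg h0, hj]; simp
        rw [ih r' a (b+1) ht hv]
        have c0 : cnt0 j (s :: t) = cnt0 j t := by
          simp only [cnt0, List.filter_cons, hiff, h0e, Bool.and_eq_true, decide_eq_true_eq, List.length_cons]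
          rw [if_neg (by simp_all)]
        have c1 : cnt1 j (s :: t) = cnt1 j t + 1 := by
          simp only [cnt1, List.filter_cons, hiff, h0e, Bool.and_eq_true, decide_eq_true_eq, List.length_cons]
          rw [if_pos ⟨hjs, h0⟩]; simp
        rw [c0, c1]; push_cast; ring_nf
    · have hv : r'.getD j [] = [(a : Int), (b : Int)] := by
        rw [hr', hval, if_neg hjs, hj]
      rw [ih r' a b ht hv]
      have c0 : cnt0 j (s :: t) = cnt0 j t := by
        simp only [cnt0, List.filter_cons, hiff, h0e, Bool.and_eq_true, decide_eq_true_eq, List.length_cons]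
        rw [if_neg (by simp_all)]
      have c1 : cnt1 j (s :: t) = cnt1 j t := by
        simp only [cnt1, List.filter_cons, hiff, h0e, Bool.and_eq_true, decide_eq_true_eq, List.length_cons]
        rw [if_neg (by simp_all)]
      rw [c0, c1]

-- B's column counts coincide with cnt0/cnt1
theorem col_count (j : Nat) (L : List String) :
    ((L.filter (fun line => decide (j < line.toList.length))).map
      (fun line => line.toList.getD j ' ')).count '0' = cnt0 j L := by
  induction L with
  | nil => rfl
  | cons s t ih =>
    simp only [cnt0] at *
    rw [List.filter_cons, List.filter_cons]
    by_cases hjs : j < s.toList.length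
    · have hjs' : j < s.length := by simpa using hjs
      rw [if_pos (by simpa using hjs)]
      by_cases h0 : s.toList.getD j ' ' = '0'
      · have h0' : s.toList[j]?.getD ' ' = '0' := by
          simpa [List.getD_eq_getElem?_getD] using h0
        rw [if_pos (by simp only [Bool.and_eq_true, decide_eq_true_eq]; exact ⟨hjs', h0'⟩),
          List.map_cons, List.count_cons, ih, List.length_cons, if_pos (by simp [h0'])]
      · have h0' : ¬ s.toList[j]?.getD ' ' = '0' := by
          simpa [List.getD_eq_getElem?_getD] using h0
        rw [if_neg (by simp only [Bool.and_eq_true, decide_eq_true_eq]; exact fun hc => h0' hc.2),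
          List.map_cons, List.count_cons, ih, if_neg (by simp [h0']), Nat.add_zero]
    · have hjs' : ¬ j < s.length := by simpa using hjs
      rw [if_neg (by simpa using hjs),
        if_neg (by simp only [Bool.and_eq_true, decide_eq_true_eq]; exact fun hc => hjs' hc.1)]
      exact ih

theorem col_len (j : Nat) (L : List String) :
    ((L.filter (fun line => decide (j < line.toList.length))).map
      (fun line => line.toList.getD j ' ')).length = cnt0 j L + cnt1 j L := by
  induction L with
  | nil => rfl
  | cons s t ih =>
    simp only [cnt0, cnt1] at *
    rw [List.filter_cons, List.filter_cons, List.filter_cons]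
    by_cases hjs : j < s.toList.length
    · have hjs' : j < s.length := by simpa using hjs
      rw [if_pos (by simpa using hjs)]
      by_cases h0 : s.toList.getD j ' ' = '0'
      · have h0' : s.toList[j]?.getD ' ' = '0' := by
          simpa [List.getD_eq_getElem?_getD] using h0
        rw [if_pos (by simp only [Bool.and_eq_true, decide_eq_true_eq]; exact ⟨hjs', h0'⟩),
          if_neg (by simp only [Bool.and_eq_true, Bool.not_eq_eq_eq_not, Bool.not_true,
            decide_eq_false_iff_not, decide_eq_true_eq]; exact fun hc => hc.2 h0'),
          List.map_cons, List.length_cons, List.length_cons, ih]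
        omega
      · have h0' : ¬ s.toList[j]?.getD ' ' = '0' := by
          simpa [List.getD_eq_getElem?_getD] using h0
        rw [if_neg (by simp only [Bool.and_eq_true, decide_eq_true_eq]; exact fun hc => h0' hc.2),
          if_pos (by simp only [Bool.and_eq_true, Bool.not_eq_eq_eq_not, Bool.not_true,
            decide_eq_false_iff_not, decide_eq_true_eq]; exact ⟨hjs', h0'⟩),
          List.map_cons, List.length_cons, List.length_cons, ih]
        omega
    · have hjs' : ¬ j < s.length := by simpa using hjs
      rw [if_neg (by simpa using hjs),
        if_neg (by simp only [Bool.and_eq_true, decide_eq_true_eq]; exact fun hc => hjs' hc.1),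
        if_neg (by simp only [Bool.and_eq_true, Bool.not_eq_eq_eq_not, Bool.not_true,
          decide_eq_false_iff_not, decide_eq_true_eq]; exact fun hc => hjs' hc.1)]
      exact ih

theorem outer_length (L : List String) (r : List (List Int)) :
    (L.foldl (fun res line => (List.range line.toList.length).foldl (stepA line.toList) res) r).length
      = r.length := by
  induction L generalizing r with
  | nil => rfl
  | cons s t ih => simp only [List.foldl]; rw [ih, lineFold_length]

-- ===== VERDICT (by name: the statement is the Claim_ definition above) =====
theorem process_bits_spec : Claim_equal_process_bits := by
  intro report _ hpre
  obtain ⟨hne, hlenb⟩ := hpre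
  unfold Spec_process_bits process_bits process_bits_alt
  show report.foldl (fun res line => (List.range line.toList.length).foldl (stepA line.toList) res)
        (((report.headD "").toList).map (fun _ => ([0, 0] : List Int)))
      = (List.range (report.headD "").toList.length).map (fun i =>
          [(((((report.filter (fun line => decide (i < line.toList.length))).map
              (fun line => line.toList.getD i ' ')).count '0' : Nat) : Int)),
            ((((report.filter (fun line => decide (i < line.toList.length))).map
              (fun line => line.toList.getD i ' ')).length : Nat) : Int)
            - (((report.filter (fun line => decide (i < line.toList.length))).map
              (fun line => line.toList.getD i ' ')).count '0' : Nat)])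
  have hinitlen : (((report.headD "").toList).map (fun _ => ([0, 0] : List Int))).length
      = (report.headD "").toList.length := by simp
  have hfoldlen := outer_length report (((report.headD "").toList).map (fun _ => ([0, 0] : List Int)))
  apply List.ext_getElem
  · rw [hfoldlen, hinitlen, List.length_map, List.length_range]
  · intro j hj1 hj2
    have hjn : j < (report.headD "").toList.length := by
      rw [hfoldlen, hinitlen] at hj1; exact hj1
    have hinitj : (((report.headD "").toList).map (fun _ => ([0, 0] : List Int))).getD j []
        = [(0 : Int), (0 : Int)] := by
      rw [List.getD_eq_getElem?_getD,
        List.getElem?_eq_getElem (by simpa using hjn), List.getElem_map]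
      rfl
    have hA := outer_getD report _ j 0 0
      (fun s hs => by rw [hinitlen]; exact hlenb s hs) hinitj
    have hAel : (report.foldl (fun res line => (List.range line.toList.length).foldl (stepA line.toList) res)
        (((report.headD "").toList).map (fun _ => ([0, 0] : List Int))))[j]
        = [(cnt0 j report : Int), (cnt1 j report : Int)] := by
      rw [List.getD_eq_getElem?_getD, List.getElem?_eq_getElem hj1] at hA
      simpa using hA
    rw [hAel]
    simp only [List.getElem_map, List.getElem_range]
    rw [col_count j report, col_len j report]
    push_cast
    simp only [List.cons.injEq, and_true]
    exact ⟨trivial, by omega⟩
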